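-- pv_equiv track=rewrite | github.com/JST2019-WS/GroupC | extract.py | extractCompaniesId
-- ===== SOURCE A (Python) =====
-- def extractCompaniesId(company):
--     companies_set = set(company)
--     companies_set = {x for x in companies_set if x==x}
--     companies_set = sorted(companies_set)
--
--     companies_dict = {}
--     for idx, elems in enumerate(companies_set):
--         companies_dict[elems] = idx
--
--     companies_id = []
--     for com in company:
--         try:
--             companies_id.append(companies_dict[com])
--         except:
--             companies_id.append(-1)
--
--     return companies_id
-- ===== SOURCE B (Python) =====
-- def _bisect_left(a, x):
--     lo, hi = 0, len(a)
--     while lo < hi: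
--         mid = (lo + hi) // 2
--         if a[mid] < x:
--             lo = mid + 1
--         else:
--             hi = mid
--     return lo
--
--
-- def extractCompaniesId(company):
--     uniq = sorted({x for x in set(company) if x == x})
--     out = []
--     for com in company:
--         pos = _bisect_left(uniq, com)
--         if pos < len(uniq) and uniq[pos] == com:
--             out.append(pos)
--         else:
--             out.append(-1)
--     return out
-- ===== Notes on version B (the rewrite author's own statement) =====
-- stated objective: alternative
-- what changed: Replaces the value-to-index dict built by a separate enumerate loop with a hand-written binary search (bisect_left) on the sorted unique list, guarded by a bounds-and-equality check that yields -1 for missing values.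
import Mathlib
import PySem

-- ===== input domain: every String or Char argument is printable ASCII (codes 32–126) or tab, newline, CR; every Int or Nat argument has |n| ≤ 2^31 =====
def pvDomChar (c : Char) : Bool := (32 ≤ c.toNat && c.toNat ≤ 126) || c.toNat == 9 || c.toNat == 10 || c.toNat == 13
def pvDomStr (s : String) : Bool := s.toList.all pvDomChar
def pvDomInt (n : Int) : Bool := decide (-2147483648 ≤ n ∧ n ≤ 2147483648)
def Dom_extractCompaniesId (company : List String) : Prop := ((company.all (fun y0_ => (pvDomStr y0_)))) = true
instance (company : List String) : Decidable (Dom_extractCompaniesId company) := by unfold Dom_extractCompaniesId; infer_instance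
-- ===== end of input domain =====

-- B replaces A's value→index dict (built in a separate enumerate loop) by a hand-written
-- binary search on the sorted unique list, with a bounds-and-equality guard giving -1;
-- objective: alternative (same asymptotics, different lookup structure).

-- ===== PORT A =====
def extractCompaniesId (company : List String) : List Int :=
  -- companies_set = set(company)
  let s1 : PySem.Set String := PySem.Set.ofList company
  -- companies_set = {x for x in companies_set if x==x}
  let s2 : PySem.Set String := PySem.Set.ofList (s1.filter (fun x => x == x))
  -- companies_set = sorted(companies_set)
  let cs : List String := PySem.List.sorted s2 (fun x => x) false
  -- for idx, elems in enumerate(companies_set): companies_dict[elems] = idx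
  let d : PySem.Dict String Int :=
    (PySem.List.enumerate cs 0).foldl (fun d p => d.insert p.2 p.1) PySem.Dict.empty
  -- for com in company: try append(companies_dict[com]) except append(-1)
  company.foldl (fun acc com =>
    acc ++ [match d.get? com with | some v => v | none => -1]) []

-- ===== PORT B =====
-- hand-written bisect_left (the while loop of Source B; structural fuel recursion on hi - lo,
-- which bounds the number of iterations, so the loop is transcribed step for step)
def pvBisectLeftGo (a : List String) (x : String) : Nat → Nat → Nat → Nat
  | 0, lo, _ => lo
  | fuel + 1, lo, hi =>
    if lo < hi then
      -- mid = (lo + hi) // 2, inlined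
      if a.getD ((lo + hi) / 2) "" < x then pvBisectLeftGo a x fuel ((lo + hi) / 2 + 1) hi
      else pvBisectLeftGo a x fuel lo ((lo + hi) / 2)
    else lo

def pvBisectLeft (a : List String) (x : String) (lo hi : Nat) : Nat :=
  pvBisectLeftGo a x (hi - lo) lo hi

def extractCompaniesId_alt (company : List String) : List Int :=
  -- uniq = sorted({x for x in set(company) if x == x})
  let uniq : List String :=
    PySem.List.sorted
      (PySem.Set.ofList ((PySem.Set.ofList company).filter (fun x => x == x)))
      (fun x => x) false
  company.foldl (fun acc com =>
    let pos := pvBisectLeft uniq com 0 uniq.length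
    acc ++ [if pos < uniq.length ∧ uniq.getD pos "" = com then (pos : Int) else -1]) []

-- ===== PRECONDITION & SPEC =====
def Spec_extractCompaniesId (company : List String) (out : List Int) : Prop := out = extractCompaniesId_alt company
instance (company : List String) (out : List Int) : Decidable (Spec_extractCompaniesId company out) := by unfold Spec_extractCompaniesId; infer_instance

-- ===== CLAIM (what is proved, stated in full; the proofs are below) =====
def Claim_equal_extractCompaniesId : Prop := ∀ (company : List String), Dom_extractCompaniesId company → Spec_extractCompaniesId company (extractCompaniesId company)

-- ===== LEMMAS AND PROOFS =====

-- the guard x == x is always true on strings: the filter keeps everything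
lemma pv_filter_self_eq (xs : List String) : xs.filter (fun x => x == x) = xs :=
  List.filter_eq_self.mpr (by intro a _; simp)

-- both programs' sorted unique list
def pvCs (company : List String) : List String :=
  PySem.List.sorted (PySem.Set.ofList company) (fun x => x) false

lemma pvCs_pairwise (company : List String) : (pvCs company).Pairwise (· < ·) :=
  PySem.List.sorted_ofList_pairwise_lt company

lemma pvCs_nodup (company : List String) : (pvCs company).Nodup :=
  (pvCs_pairwise company).imp (fun h => ne_of_lt h)

lemma pvCs_mem (company : List String) (com : String) (h : com ∈ company) :
    com ∈ pvCs company := by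
  unfold pvCs
  rw [PySem.List.mem_sorted]
  exact (PySem.Set.mem_ofList company com).mpr h

-- the dict built from enumerate maps each element of a nodup list to its index
lemma pv_dict_enum_get? (l : List String) (hnd : l.Nodup) (s : Int)
    (d0 : PySem.Dict String Int) (x : String) :
    ((PySem.List.enumerate l s).foldl (fun d p => d.insert p.2 p.1) d0).get? x =
      if x ∈ l then some (s + (l.idxOf x : Int)) else d0.get? x := by
  induction l generalizing s d0 with
  | nil => simp [PySem.List.enumerate]
  | cons y t ih =>
    rw [PySem.List.enumerate_cons]
    simp only [List.foldl_cons]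
    rw [ih (List.nodup_cons.mp hnd).2 (s + 1) (d0.insert y s)]
    by_cases hxy : x = y
    · subst hxy
      have hxt : x ∉ t := (List.nodup_cons.mp hnd).1
      simp [hxt, List.idxOf_cons_self]
    · by_cases hxt : x ∈ t
      · simp only [List.mem_cons, hxy, false_or, if_pos hxt]
        have hidx : (y :: t).idxOf x = t.idxOf x + 1 := by
          simp [Ne.symm hxy]
        rw [hidx]
        congr 1
        push_cast
        ring
      · have hmem : x ∉ y :: t := by simp [hxy, hxt]
        simp only [if_neg hxt, if_neg hmem]
        rw [PySem.Dict.get?_insert]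
        simp [hxy]

-- binary-search invariant on a strictly increasing list:
-- everything left of the result is < x, nothing at or right of it is
lemma pv_bisect_inv_fuel (a : List String) (x : String) (hpw : a.Pairwise (· < ·)) :
    ∀ (n lo hi : Nat), hi - lo ≤ n → hi ≤ a.length →
    (∀ j (hj : j < a.length), j < lo → a[j] < x) →
    (∀ j (hj : j < a.length), hi ≤ j → ¬ a[j] < x) →
    (∀ j (hj : j < a.length), j < pvBisectLeftGo a x n lo hi → a[j] < x) ∧
    (∀ j (hj : j < a.length), pvBisectLeftGo a x n lo hi ≤ j → ¬ a[j] < x) := by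
  have hmono := List.pairwise_iff_getElem.mp hpw
  intro n
  induction n with
  | zero =>
    intro lo hi hn hhi h1 h2
    simp only [pvBisectLeftGo]
    exact ⟨fun j hj hjlt => h1 j hj hjlt, fun j hj hjge => h2 j hj (by omega)⟩
  | succ n ih =>
    intro lo hi hn hhi h1 h2
    simp only [pvBisectLeftGo]
    by_cases h : lo < hi
    · rw [if_pos h]
      have hmidlt : (lo + hi) / 2 < a.length := by omega
      have hget : a.getD ((lo + hi) / 2) "" = a[(lo + hi) / 2] :=
        List.getD_eq_getElem a "" hmidlt
      by_cases hmid : a.getD ((lo + hi) / 2) "" < x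
      · rw [if_pos hmid]
        rw [hget] at hmid
        refine ih ((lo + hi) / 2 + 1) hi (by omega) hhi ?_ h2
        intro j hj hjlt
        rcases Nat.eq_or_lt_of_le (Nat.le_of_lt_succ hjlt) with rfl | hlt
        · exact hmid
        · exact lt_trans (hmono j ((lo + hi) / 2) hj hmidlt hlt) hmid
      · rw [if_neg hmid]
        rw [hget] at hmid
        refine ih lo ((lo + hi) / 2) (by omega) (by omega) h1 ?_
        intro j hj hjge
        rcases Nat.eq_or_lt_of_le hjge with rfl | hlt
        · exact hmid
        · intro hcon
          exact hmid (lt_trans (hmono ((lo + hi) / 2) j hmidlt hj hlt) hcon)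
    · rw [if_neg h]
      exact ⟨fun j hj hjlt => h1 j hj hjlt, fun j hj hjge => h2 j hj (by omega)⟩

lemma pv_bisect_inv (a : List String) (x : String) (hpw : a.Pairwise (· < ·))
    (lo hi : Nat) (hhi : hi ≤ a.length)
    (h1 : ∀ j (hj : j < a.length), j < lo → a[j] < x)
    (h2 : ∀ j (hj : j < a.length), hi ≤ j → ¬ a[j] < x) :
    (∀ j (hj : j < a.length), j < pvBisectLeft a x lo hi → a[j] < x) ∧
    (∀ j (hj : j < a.length), pvBisectLeft a x lo hi ≤ j → ¬ a[j] < x) :=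
  pv_bisect_inv_fuel a x hpw (hi - lo) lo hi (le_refl _) hhi h1 h2

-- on a strictly sorted list, bisect finds the index of a present element
lemma pv_bisect_at_mem (a : List String) (hpw : a.Pairwise (· < ·)) (x : String)
    (i : Nat) (hi : i < a.length) (hx : a[i] = x) :
    pvBisectLeft a x 0 a.length = i := by
  obtain ⟨hL, hR⟩ := pv_bisect_inv a x hpw 0 a.length (le_refl _)
    (by intro j hj hjlt; omega) (by intro j hj hjge; omega)
  set r := pvBisectLeft a x 0 a.length with hr
  by_contra hne
  rcases Nat.lt_or_ge r i with hlt | hge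
  · have hlt2 : a[r]'(by omega) < a[i] :=
      (List.pairwise_iff_getElem.mp hpw) r i (by omega) hi hlt
    rw [hx] at hlt2
    exact hR r (by omega) (le_refl r) hlt2
  · have hlt : i < r := by omega
    have := hL i hi hlt
    rw [hx] at this
    exact lt_irrefl x this

-- folds that append one element per input are maps
lemma pv_foldl_append (l : List String) (f : String → Int) (acc : List Int) :
    l.foldl (fun acc com => acc ++ [f com]) acc = acc ++ l.map f := by
  induction l generalizing acc with
  | nil => simp
  | cons y t ih => simp [ih]

-- ===== VERDICT (by name: the statement is the Claim_ definition above) =====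
theorem extractCompaniesId_spec : Claim_equal_extractCompaniesId := by
  intro company _
  unfold Spec_extractCompaniesId
  simp only [extractCompaniesId, extractCompaniesId_alt]
  rw [pv_filter_self_eq, PySem.Set.ofList_ofList]
  have hfold : ∀ (g : String → Int),
      (List.foldl (fun acc com => acc ++ [g com]) [] company) = company.map g :=
    fun g => by rw [pv_foldl_append]; simp
  rw [hfold, hfold]
  apply List.map_congr_left
  intro com hcom
  have e : PySem.List.sorted (PySem.Set.ofList company) (fun x => x) false
      = pvCs company := rfl
  rw [e]
  have hmem : com ∈ pvCs company := pvCs_mem company com hcom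
  have hi : (pvCs company).idxOf com < (pvCs company).length :=
    List.idxOf_lt_length_of_mem hmem
  have hx : (pvCs company)[(pvCs company).idxOf com] = com := List.getElem_idxOf hi
  -- A's side: the dict lookup finds the index
  rw [pv_dict_enum_get? (pvCs company) (pvCs_nodup company) 0 PySem.Dict.empty com,
    if_pos hmem]
  -- B's side: the binary search finds the same index
  rw [pv_bisect_at_mem (pvCs company) (pvCs_pairwise company) com
    ((pvCs company).idxOf com) hi hx]
  have hguard : (pvCs company).idxOf com < (pvCs company).length ∧
      (pvCs company).getD ((pvCs company).idxOf com) "" = com := by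
    refine ⟨hi, ?_⟩
    rw [List.getD_eq_getElem (pvCs company) "" hi]
    exact hx
  rw [if_pos hguard]
  simp
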